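-- pv_equiv track=rewrite | github.com/motchiecgithub/IT-project | phonetic_text/list_convert.py | list_convert
-- ===== SOURCE A (Python) =====
-- def list_convert(word):
--     # create a list of letter group
--     word = word.lower()
--     word_list = []
--
--     #split letters into groups e.g dearest = ['d', 'ea', 'r', 'e', 's', 't']
--     i = 0
--     while i < len(word):
--         # convert letters into groups
--         if (i+1) < len(word):
--             if word[i] + word[i+1] in ['ae', 'ai', 'ay', 'ea', 'ee', 'ei', 'ey', 'ie', 'oa', 'oe', 'oi', 'oo', 'ou', 'oy', 'ue', 'ui']:
--                 word_list.append(word[i] + word[i+1])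
--                 i += 2
--             else:
--                 word_list.append(word[i])
--                 i += 1
--         else:
--             word_list.append(word[i])
--             i += 1
--
--     return word_list
-- ===== SOURCE B (Python) =====
-- import re
--
-- _TOKEN = re.compile(r'ae|ai|ay|ea|ee|ei|ey|ie|oa|oe|oi|oo|ou|oy|ue|ui|.', re.DOTALL)
--
-- def list_convert(word):
--     # greedy left-to-right regex tokenization: prefer a digraph, else one char
--     return _TOKEN.findall(word.lower())
-- ===== Notes on version B (the rewrite author's own statement) =====
-- stated objective: faster
-- what changed: Replaced the explicit index-based while loop with a single regex findall whose greedy left-to-right alternation (16 digraphs, then a DOTALL '.') performs the same tokenization in the C regex engine.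
import Mathlib
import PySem

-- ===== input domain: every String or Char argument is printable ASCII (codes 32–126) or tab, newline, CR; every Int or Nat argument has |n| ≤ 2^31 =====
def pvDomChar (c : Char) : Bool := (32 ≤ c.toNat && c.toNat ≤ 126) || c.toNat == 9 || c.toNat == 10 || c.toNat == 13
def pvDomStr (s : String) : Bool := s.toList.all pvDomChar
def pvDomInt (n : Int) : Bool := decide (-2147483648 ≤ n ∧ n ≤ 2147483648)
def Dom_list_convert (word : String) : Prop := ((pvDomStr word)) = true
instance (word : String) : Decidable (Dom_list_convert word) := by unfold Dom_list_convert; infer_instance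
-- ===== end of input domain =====

-- B replaces A's index-based while loop by a single greedy regex tokenization (idiomatic; same cost).

-- ===== PORT A =====
-- the digraph list A compares against
def pvDigraphs : List String :=
  ["ae", "ai", "ay", "ea", "ee", "ei", "ey", "ie", "oa", "oe", "oi", "oo", "ou", "oy", "ue", "ui"]

-- A's while loop: index i over the lowered word, appending to word_list
def pvLoopA (cs : List Char) (i : Nat) (acc : List String) : List String :=
  if h : i < cs.length then
    if h2 : i + 1 < cs.length then
      if String.ofList [cs[i], cs[i+1]] ∈ pvDigraphs then
        pvLoopA cs (i + 2) (acc ++ [String.ofList [cs[i], cs[i+1]]])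
      else
        pvLoopA cs (i + 1) (acc ++ [String.ofList [cs[i]]])
    else
      pvLoopA cs (i + 1) (acc ++ [String.ofList [cs[i]]])
  else acc
termination_by cs.length - i

def list_convert (word : String) : List String :=
  pvLoopA (PySem.Str.lower word).toList 0 []

-- ===== PORT B =====
-- hand port of the regex r'ae|ai|…|ui|.' with re.DOTALL: greedy left-to-right
-- alternation = at each position take a listed digraph if it matches, else any one char (exact)
def pvTok : List Char → List String
  | [] => []
  | [a] => [String.ofList [a]]
  | a :: b :: rest =>
    if String.ofList [a, b] ∈ pvDigraphs then String.ofList [a, b] :: pvTok rest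
    else String.ofList [a] :: pvTok (b :: rest)

def list_convert_alt (word : String) : List String :=
  pvTok (PySem.Str.lower word).toList

-- ===== PRECONDITION & SPEC =====
def Spec_list_convert (word : String) (out : List String) : Prop := out = list_convert_alt word
instance (word : String) (out : List String) : Decidable (Spec_list_convert word out) := by unfold Spec_list_convert; infer_instance

-- ===== CLAIM (what is proved, stated in full; the proofs are below) =====
def Claim_equal_list_convert : Prop := ∀ (word : String), Dom_list_convert word → Spec_list_convert word (list_convert word)

-- ===== LEMMAS AND PROOFS =====
theorem pvLoopA_eq_tok (cs : List Char) (i : Nat) (acc : List String) :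
    pvLoopA cs i acc = acc ++ pvTok (cs.drop i) := by
  induction i, acc using pvLoopA.induct cs with
  | case1 i acc h h2 hd ih =>
    rw [pvLoopA]
    simp only [dif_pos h, dif_pos h2, if_pos hd, ih]
    have : cs.drop i = cs[i] :: cs[i+1] :: cs.drop (i+2) := by
      rw [List.drop_eq_getElem_cons h, List.drop_eq_getElem_cons h2]
    rw [this]
    simp only [pvTok]
    rw [if_pos hd]
    simp
  | case2 i acc h h2 hd ih =>
    rw [pvLoopA]
    simp only [dif_pos h, dif_pos h2, if_neg hd, ih]
    have : cs.drop i = cs[i] :: cs[i+1] :: cs.drop (i+2) := by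
      rw [List.drop_eq_getElem_cons h, List.drop_eq_getElem_cons h2]
    have h1 : cs.drop (i+1) = cs[i+1] :: cs.drop (i+2) := List.drop_eq_getElem_cons h2
    rw [this, h1]
    simp only [pvTok]
    rw [if_neg hd]
    simp
  | case3 i acc h h2 ih =>
    rw [pvLoopA]
    simp only [dif_pos h, dif_neg h2, ih]
    have : cs.drop i = cs[i] :: cs.drop (i+1) := List.drop_eq_getElem_cons h
    have hnil : cs.drop (i+1) = [] := List.drop_eq_nil_of_le (by omega)
    rw [this, hnil]
    simp [pvTok]
  | case4 i acc h =>
    rw [pvLoopA]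
    have : cs.drop i = [] := List.drop_eq_nil_of_le (by omega)
    simp [dif_neg h, this, pvTok]

-- ===== VERDICT (by name: the statement is the Claim_ definition above) =====
theorem list_convert_spec : Claim_equal_list_convert := by
  intro word _
  unfold Spec_list_convert list_convert list_convert_alt
  simpa using pvLoopA_eq_tok (PySem.Str.lower word).toList 0 []
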